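-- pv_equiv track=rewrite | github.com/1r0nw1ll/quantum-arithmetic-research | pythagoras_quantum_world_rt/build_pyth2_workbook.py | qa_hooks
-- ===== SOURCE A (Python) =====
-- def qa_hooks(question_text: str, answer_text: str) -> list[str]:
--     lowered = f"{question_text} {answer_text}".lower()
--     hooks: list[str] = []
--     if "bead" in lowered or "b," in lowered or "e =" in lowered:
--         hooks.append("bead_number_constraints")
--     if "fibonacci" in lowered:
--         hooks.append("fibonacci_periodicity")
--     if "prime" in lowered:
--         hooks.append("prime_structure")
--     if "pairs" in lowered:
--         hooks.append("pair_counting")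
--     if "symmetrical" in lowered:
--         hooks.append("mirror_symmetry")
--     deduped: list[str] = []
--     for hook in hooks:
--         if hook not in deduped:
--             deduped.append(hook)
--     return deduped
-- ===== SOURCE B (Python) =====
-- _KEYWORD_TAGS = [
--     ("bead", "bead_number_constraints"),
--     ("b,", "bead_number_constraints"),
--     ("e =", "bead_number_constraints"),
--     ("fibonacci", "fibonacci_periodicity"),
--     ("prime", "prime_structure"),
--     ("pairs", "pair_counting"),
--     ("symmetrical", "mirror_symmetry"),
-- ]
-- _TAG_ORDER = ["bead_number_constraints", "fibonacci_periodicity",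
--               "prime_structure", "pair_counting", "mirror_symmetry"]
--
--
-- def qa_hooks(question_text: str, answer_text: str) -> list[str]:
--     # Single left-to-right scan of the text: at each position, try every
--     # keyword as a prefix of the remaining suffix, collecting matched tags
--     # in a set; finally emit the found tags in canonical order.
--     lowered = (question_text + " " + answer_text).lower()
--     found = set()
--     for i in range(len(lowered) + 1):
--         for keyword, tag in _KEYWORD_TAGS:
--             if lowered.startswith(keyword, i):
--                 found.add(tag)
--     return [tag for tag in _TAG_ORDER if tag in found]
-- ===== Notes on version B (the rewrite author's own statement) =====
-- stated objective: alternative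
-- what changed: Instead of A's seven independent substring searches followed by a quadratic dedup loop, B makes one left-to-right scan over the lowered text, prefix-matching every keyword at each position into a found-set, and finally emits the matched tags in a fixed canonical order (same asymptotic cost; trades C-level 'in' searches for an explicit single pass).
import Mathlib
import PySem

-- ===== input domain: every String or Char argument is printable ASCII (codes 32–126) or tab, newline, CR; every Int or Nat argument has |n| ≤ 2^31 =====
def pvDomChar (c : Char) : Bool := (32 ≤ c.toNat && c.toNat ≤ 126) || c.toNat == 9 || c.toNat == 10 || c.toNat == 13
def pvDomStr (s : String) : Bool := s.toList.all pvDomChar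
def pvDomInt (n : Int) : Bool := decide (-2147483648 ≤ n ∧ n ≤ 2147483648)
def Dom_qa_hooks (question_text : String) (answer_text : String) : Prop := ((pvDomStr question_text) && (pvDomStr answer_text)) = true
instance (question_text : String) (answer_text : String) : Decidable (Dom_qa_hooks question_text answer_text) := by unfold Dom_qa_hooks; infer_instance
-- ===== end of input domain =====

-- B replaces A's per-keyword substring searches (plus a dedup loop) with one left-to-right scan
-- of the text that prefix-matches all keywords at each position into a found-set, then emits the
-- found tags in canonical order (alternative multi-pattern-scan decomposition; same cost class).

-- ===== PORT A =====
def qa_hooks (question_text : String) (answer_text : String) : List String :=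
  let lowered := PySem.Str.lower (question_text ++ " " ++ answer_text)
  let hooks : List String := []
  let hooks := if PySem.Str.isIn "bead" lowered || PySem.Str.isIn "b," lowered
      || PySem.Str.isIn "e =" lowered then hooks ++ ["bead_number_constraints"] else hooks
  let hooks := if PySem.Str.isIn "fibonacci" lowered then hooks ++ ["fibonacci_periodicity"] else hooks
  let hooks := if PySem.Str.isIn "prime" lowered then hooks ++ ["prime_structure"] else hooks
  let hooks := if PySem.Str.isIn "pairs" lowered then hooks ++ ["pair_counting"] else hooks
  let hooks := if PySem.Str.isIn "symmetrical" lowered then hooks ++ ["mirror_symmetry"] else hooks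
  hooks.foldl (fun deduped hook => if hook ∈ deduped then deduped else deduped ++ [hook]) []

-- ===== PORT B =====
def qaKeywordTags : List (List Char × String) :=
  [ ("bead".toList, "bead_number_constraints")
  , ("b,".toList, "bead_number_constraints")
  , ("e =".toList, "bead_number_constraints")
  , ("fibonacci".toList, "fibonacci_periodicity")
  , ("prime".toList, "prime_structure")
  , ("pairs".toList, "pair_counting")
  , ("symmetrical".toList, "mirror_symmetry") ]

def qaTagOrder : List String :=
  ["bead_number_constraints", "fibonacci_periodicity", "prime_structure",
   "pair_counting", "mirror_symmetry"]

def qa_hooks_alt (question_text : String) (answer_text : String) : List String :=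
  let lowered := (PySem.Str.lower (question_text ++ " " ++ answer_text)).toList
  let found : PySem.Set String := (List.range (lowered.length + 1)).foldl
    (fun s i => qaKeywordTags.foldl
      (fun s p => if PySem.Chars.startswith (lowered.drop i) p.1 then PySem.Set.add s p.2 else s)
      s)
    PySem.Set.empty
  qaTagOrder.filter (fun tag => PySem.Set.contains found tag)

-- ===== PRECONDITION & SPEC =====
def Spec_qa_hooks (question_text : String) (answer_text : String) (out : List String) : Prop := out = qa_hooks_alt question_text answer_text
instance (question_text : String) (answer_text : String) (out : List String) : Decidable (Spec_qa_hooks question_text answer_text out) := by unfold Spec_qa_hooks; infer_instance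

-- ===== CLAIM (what is proved, stated in full; the proofs are below) =====
def Claim_equal_qa_hooks : Prop := ∀ (question_text : String) (answer_text : String), Dom_qa_hooks question_text answer_text → Spec_qa_hooks question_text answer_text (qa_hooks question_text answer_text)

-- ===== LEMMAS AND PROOFS =====

-- membership in the inner per-position fold
theorem mem_inner_fold (l : List Char) (i : Nat) (s : PySem.Set String) (x : String) :
    x ∈ qaKeywordTags.foldl
      (fun s p => if PySem.Chars.startswith (l.drop i) p.1 then PySem.Set.add s p.2 else s) s ↔
    x ∈ s ∨ ∃ p ∈ qaKeywordTags, PySem.Chars.startswith (l.drop i) p.1 = true ∧ x = p.2 := by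
  induction qaKeywordTags generalizing s with
  | nil => simp
  | cons p ps ih =>
    cases h : PySem.Chars.startswith (l.drop i) p.1 <;>
      simp only [List.foldl_cons, h, if_true, if_false, Bool.false_eq_true,
        ih, PySem.Set.mem_add, List.mem_cons] <;>
      constructor
    · rintro (hs | ⟨p', hp', hsw, hx⟩)
      · exact Or.inl hs
      · exact Or.inr ⟨p', Or.inr hp', hsw, hx⟩
    · rintro (hs | ⟨p', hp' | hp', hsw, hx⟩)
      · exact Or.inl hs
      · subst hp'; rw [hsw] at h; cases h
      · exact Or.inr ⟨p', hp', hsw, hx⟩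
    · rintro ((hs | hx) | ⟨p', hp', hsw, hx⟩)
      · exact Or.inl hs
      · exact Or.inr ⟨p, Or.inl rfl, h, hx⟩
      · exact Or.inr ⟨p', Or.inr hp', hsw, hx⟩
    · rintro (hs | ⟨p', hp' | hp', hsw, hx⟩)
      · exact Or.inl (Or.inl hs)
      · subst hp'; exact Or.inl (Or.inr hx)
      · exact Or.inr ⟨p', hp', hsw, hx⟩

-- membership in the outer fold over positions
theorem mem_outer_fold (l : List Char) (r : List Nat) (s : PySem.Set String) (x : String) :
    x ∈ r.foldl
      (fun s i => qaKeywordTags.foldl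
        (fun s p => if PySem.Chars.startswith (l.drop i) p.1 then PySem.Set.add s p.2 else s) s) s ↔
    x ∈ s ∨ ∃ i ∈ r, ∃ p ∈ qaKeywordTags, PySem.Chars.startswith (l.drop i) p.1 = true ∧ x = p.2 := by
  induction r generalizing s with
  | nil => simp
  | cons i r ih =>
    rw [List.foldl_cons, ih, mem_inner_fold]
    constructor
    · rintro ((hs | hp) | ⟨j, hj, hp⟩)
      · exact Or.inl hs
      · exact Or.inr ⟨i, List.mem_cons_self, hp⟩
      · exact Or.inr ⟨j, List.mem_cons_of_mem _ hj, hp⟩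
    · rintro (hs | ⟨j, hj, hp⟩)
      · exact Or.inl (Or.inl hs)
      · rcases List.mem_cons.mp hj with rfl | hj
        · exact Or.inl (Or.inr hp)
        · exact Or.inr ⟨j, hj, hp⟩

-- a bounded prefix-at-some-position search over range (len+1) is exactly substring containment
theorem exists_pos_startswith_iff (l kw : List Char) :
    (∃ i ∈ List.range (l.length + 1), PySem.Chars.startswith (l.drop i) kw = true) ↔
      PySem.Chars.isIn kw l = true := by
  rw [← PySem.Chars.exists_prefix_drop_iff_isIn]
  constructor
  · rintro ⟨i, _, hi⟩
    exact ⟨i, (PySem.Chars.startswith_iff _ _).mp hi⟩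
  · rintro ⟨j, hj⟩
    refine ⟨min j l.length, List.mem_range.mpr (by omega), ?_⟩
    rw [PySem.Chars.startswith_iff]
    by_cases h : j ≤ l.length
    · simpa [min_eq_left h] using hj
    · have hd : l.drop j = [] := List.drop_eq_nil_of_le (by omega)
      rw [hd] at hj
      have hkw : kw = [] := List.prefix_nil.mp hj
      simp [hkw]

-- found-set membership as an `any` over the keyword table
theorem contains_found_eq (l : List Char) (t : String) :
    PySem.Set.contains ((List.range (l.length + 1)).foldl
      (fun s i => qaKeywordTags.foldl
        (fun s p => if PySem.Chars.startswith (l.drop i) p.1 then PySem.Set.add s p.2 else s) s)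
      PySem.Set.empty) t
    = qaKeywordTags.any (fun p => PySem.Chars.isIn p.1 l && (t == p.2)) := by
  apply Bool.coe_iff_coe.mp
  rw [PySem.Set.contains_iff, mem_outer_fold]
  simp only [List.any_eq_true, Bool.and_eq_true, beq_iff_eq]
  constructor
  · rintro (hs | ⟨i, hi, p, hp, hsw, hx⟩)
    · simp [PySem.Set.empty] at hs
    · exact ⟨p, hp, (exists_pos_startswith_iff l p.1).mp ⟨i, hi, hsw⟩, hx⟩
  · rintro ⟨p, hp, hin, hx⟩
    obtain ⟨i, hi, hsw⟩ := (exists_pos_startswith_iff l p.1).mpr hin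
    exact Or.inr ⟨i, hi, p, hp, hsw, hx⟩

-- ===== VERDICT (by name: the statement is the Claim_ definition above) =====
theorem qa_hooks_spec : Claim_equal_qa_hooks := by
  intro q a _
  unfold Spec_qa_hooks qa_hooks qa_hooks_alt
  simp only [qaTagOrder, List.filter_cons, List.filter_nil, contains_found_eq]
  simp [qaKeywordTags]
  rcases Bool.eq_false_or_eq_true (PySem.Chars.isIn ['b', 'e', 'a', 'd'] (PySem.Chars.lower (q.toList ++ ' ' :: a.toList))) with h1 | h1 <;>
  rcases Bool.eq_false_or_eq_true (PySem.Chars.isIn ['b', ','] (PySem.Chars.lower (q.toList ++ ' ' :: a.toList))) with h2 | h2 <;>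
  rcases Bool.eq_false_or_eq_true (PySem.Chars.isIn ['e', ' ', '='] (PySem.Chars.lower (q.toList ++ ' ' :: a.toList))) with h3 | h3 <;>
  rcases Bool.eq_false_or_eq_true (PySem.Chars.isIn ['f', 'i', 'b', 'o', 'n', 'a', 'c', 'c', 'i'] (PySem.Chars.lower (q.toList ++ ' ' :: a.toList))) with h4 | h4 <;>
  rcases Bool.eq_false_or_eq_true (PySem.Chars.isIn ['p', 'r', 'i', 'm', 'e'] (PySem.Chars.lower (q.toList ++ ' ' :: a.toList))) with h5 | h5 <;>
  rcases Bool.eq_false_or_eq_true (PySem.Chars.isIn ['p', 'a', 'i', 'r', 's'] (PySem.Chars.lower (q.toList ++ ' ' :: a.toList))) with h6 | h6 <;>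
  rcases Bool.eq_false_or_eq_true (PySem.Chars.isIn ['s', 'y', 'm', 'm', 'e', 't', 'r', 'i', 'c', 'a', 'l'] (PySem.Chars.lower (q.toList ++ ' ' :: a.toList))) with h7 | h7 <;>
  simp [h1, h2, h3, h4, h5, h6, h7]
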